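-- pv_equiv track=rewrite | github.com/teejayjan/CS325 | ForumGraph.py | landBF
-- ===== SOURCE A (Python) =====
-- def landBF(grid):
--     islands = []
--     island_count = 0
--     for y in range(len(grid)):
--         for x in range(len(grid[y])):
--             if (y, x) not in islands and grid[y][x] == "1":
--                 islands.append((y, x))
--                 if (y - 1, x) not in islands and (y + 1, x) not in islands and (y, x - 1) not in islands and \
--                         (y, x + 1) not in islands:
--                     island_count += 1
--
--     return islands, island_count
-- ===== SOURCE B (Python) =====
-- def landBF(grid):
--     islands = [(y, x) for y, row in enumerate(grid) for x, cell in enumerate(row) if cell == "1"]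
--     land = set(islands)
--     island_count = sum(1 for (y, x) in islands
--                        if (y - 1, x) not in land and (y, x - 1) not in land)
--     return islands, island_count
-- ===== Notes on version B (the rewrite author's own statement) =====
-- stated objective: simpler
-- what changed: B replaces A's single nested scan with stateful list-membership tests by two separate passes: a comprehension listing the '1' cells in row-major order, then a counting pass over that list using a set of the cells and testing only the above/left neighbours (A's below/right tests are always vacuous).
import Mathlib
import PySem

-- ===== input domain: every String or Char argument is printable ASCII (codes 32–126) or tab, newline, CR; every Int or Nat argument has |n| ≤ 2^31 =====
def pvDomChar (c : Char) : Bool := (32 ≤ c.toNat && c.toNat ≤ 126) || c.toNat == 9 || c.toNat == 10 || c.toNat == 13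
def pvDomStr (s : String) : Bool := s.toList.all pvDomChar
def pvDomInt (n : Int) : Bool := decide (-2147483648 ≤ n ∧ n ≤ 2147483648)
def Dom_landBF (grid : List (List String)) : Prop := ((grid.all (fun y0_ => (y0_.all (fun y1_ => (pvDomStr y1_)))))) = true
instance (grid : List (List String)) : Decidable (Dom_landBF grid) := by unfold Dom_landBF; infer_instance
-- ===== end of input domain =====

-- B lists the '1' cells with one comprehension and counts in a second pass using a set of
-- the cells, testing only the above/left neighbours (the below/right tests in A are always
-- vacuous); objective: simpler decomposition, same result.

-- ===== PORT A =====
def landBF (grid : List (List String)) : (List (Int × Int)) × Int :=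
  (PySem.List.pyRange 0 (grid.length : Int) 1).foldl
    (fun st y =>
      (PySem.List.pyRange 0 ((PySem.List.pyGetD grid y []).length : Int) 1).foldl
        (fun st x =>
          if (y, x) ∉ st.1 ∧ PySem.List.pyGetD (PySem.List.pyGetD grid y []) x "" == "1" then
            let islands := st.1 ++ [(y, x)]
            if (y - 1, x) ∉ islands ∧ (y + 1, x) ∉ islands ∧ (y, x - 1) ∉ islands ∧
                (y, x + 1) ∉ islands then
              (islands, st.2 + 1)
            else
              (islands, st.2)
          else st)
        st)
    (([] : List (Int × Int)), (0 : Int))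

-- ===== PORT B =====
def landBF_alt (grid : List (List String)) : (List (Int × Int)) × Int :=
  let islands : List (Int × Int) :=
    (PySem.List.enumerate grid 0).flatMap (fun yr =>
      (PySem.List.enumerate yr.2 0).filterMap (fun xc =>
        if xc.2 == "1" then some (yr.1, xc.1) else none))
  let land : PySem.Set (Int × Int) := PySem.Set.ofList islands
  let island_count : Int :=
    islands.foldl (fun c p =>
      if ¬ PySem.Set.contains land (p.1 - 1, p.2) ∧ ¬ PySem.Set.contains land (p.1, p.2 - 1)
      then c + 1 else c) 0
  (islands, island_count)

-- ===== PRECONDITION & SPEC =====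
def Spec_landBF (grid : List (List String)) (out : (List (Int × Int)) × Int) : Prop := out = landBF_alt grid
instance (grid : List (List String)) (out : (List (Int × Int)) × Int) : Decidable (Spec_landBF grid out) := by unfold Spec_landBF; infer_instance

-- ===== CLAIM (what is proved, stated in full; the proofs are below) =====
def Claim_equal_landBF : Prop := ∀ (grid : List (List String)), Dom_landBF grid → Spec_landBF grid (landBF grid)

-- ===== LEMMAS AND PROOFS =====

-- is cell p a '1' cell of the grid (Python-safe: negative coordinates are not cells)
def isOne (grid : List (List String)) (p : Int × Int) : Bool :=
  decide (0 ≤ p.1) && decide (0 ≤ p.2) &&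
    (PySem.List.pyGetD (PySem.List.pyGetD grid p.1 []) p.2 "" == "1")

-- the '1' cells (y, j) of a row for j < n, in order
def rowOnesUpto (y : Int) (row : List String) (n : Nat) : List (Int × Int) :=
  (List.range n).filterMap (fun j => if row.getD j "" == "1" then some (y, (j : Int)) else none)

-- the '1' cells of the first k rows, row-major
def onesUpto (grid : List (List String)) (k : Nat) : List (Int × Int) :=
  (List.range k).flatMap (fun (i : Nat) =>
    rowOnesUpto (i : Int) (grid.getD i []) (grid.getD i []).length)

-- the reference counting step: isolated = no '1' above and none to the left
def refstep (grid : List (List String)) (c : Int) (p : Int × Int) : Int :=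
  if ¬ isOne grid (p.1 - 1, p.2) ∧ ¬ isOne grid (p.1, p.2 - 1) then c + 1 else c

-- A's inner-loop body, named (identical to the lambda in landBF; landBF reduces to it by rfl)
def innerStep (grid : List (List String)) (y : Int) (st : List (Int × Int) × Int) (x : Int) :
    List (Int × Int) × Int :=
  if (y, x) ∉ st.1 ∧ PySem.List.pyGetD (PySem.List.pyGetD grid y []) x "" == "1" then
    let islands := st.1 ++ [(y, x)]
    if (y - 1, x) ∉ islands ∧ (y + 1, x) ∉ islands ∧ (y, x - 1) ∉ islands ∧
        (y, x + 1) ∉ islands then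
      (islands, st.2 + 1)
    else
      (islands, st.2)
  else st

-- acc holds exactly the '1' cells strictly before position (y, n) in row-major order
def charAt (grid : List (List String)) (acc : List (Int × Int)) (y n : Int) : Prop :=
  ∀ q : Int × Int, q ∈ acc ↔ (isOne grid q = true ∧ (q.1 < y ∨ (q.1 = y ∧ q.2 < n)))

lemma innerStep_eval (grid : List (List String)) (y x : Int) (acc : List (Int × Int)) (c : Int) :
    innerStep grid y (acc, c) x
      = if (y, x) ∉ acc ∧ PySem.List.pyGetD (PySem.List.pyGetD grid y []) x "" == "1" then
          (if (y - 1, x) ∉ acc ++ [(y, x)] ∧ (y + 1, x) ∉ acc ++ [(y, x)] ∧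
              (y, x - 1) ∉ acc ++ [(y, x)] ∧ (y, x + 1) ∉ acc ++ [(y, x)] then
            (acc ++ [(y, x)], c + 1)
          else
            (acc ++ [(y, x)], c))
        else (acc, c) := rfl

lemma foldl_pyRange_natCast {α : Type} (m : Nat) (f : α → Int → α) (init : α) :
    (PySem.List.pyRange 0 (m : Int) 1).foldl f init
      = (List.range m).foldl (fun st (k : Nat) => f st (k : Int)) init := by
  rw [PySem.List.pyRange_one, List.foldl_map]
  simp only [sub_zero, zero_add, Int.toNat_natCast]

lemma isOne_nonneg {grid : List (List String)} {q : Int × Int} (h : isOne grid q = true) :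
    0 ≤ q.1 ∧ 0 ≤ q.2 := by
  simp [isOne] at h
  exact h.1

lemma isOne_row (grid : List (List String)) (y : Int) (hy : 0 ≤ y) (j : Nat) :
    isOne grid (y, (j : Int)) = ((PySem.List.pyGetD grid y []).getD j "" == "1") := by
  simp [isOne, hy]

lemma isOne_col_lt {grid : List (List String)} {y x : Int} (h : isOne grid (y, x) = true) :
    x < ((PySem.List.pyGetD grid y []).length : Int) := by
  have hy : 0 ≤ y := (isOne_nonneg h).1
  have hx : 0 ≤ x := (isOne_nonneg h).2
  by_contra hc
  push_neg at hc
  rw [← Int.toNat_of_nonneg hx, isOne_row grid y hy, List.getD_eq_default] at h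
  · simp at h
  · omega

lemma isOne_row_lt {grid : List (List String)} {y x : Int} (h : isOne grid (y, x) = true) :
    y < (grid.length : Int) := by
  have hy : 0 ≤ y := (isOne_nonneg h).1
  by_contra hc
  push_neg at hc
  simp only [isOne, Bool.and_eq_true, decide_eq_true_eq, beq_iff_eq] at h
  obtain ⟨⟨-, hx⟩, h2⟩ := h
  rw [← Int.toNat_of_nonneg hy, PySem.List.pyGetD_natCast, List.getD_eq_default] at h2
  · rw [← Int.toNat_of_nonneg hx, PySem.List.pyGetD_natCast] at h2
    simp at h2
  · omega

lemma mem_rowOnesUpto {y : Int} {row : List String} {n : Nat} {q : Int × Int} :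
    q ∈ rowOnesUpto y row n ↔ ∃ j : Nat, j < n ∧ row.getD j "" == "1" ∧ q = (y, (j : Int)) := by
  simp only [rowOnesUpto, List.mem_filterMap, List.mem_range]
  constructor
  · rintro ⟨j, hj, hq⟩
    by_cases hb : row.getD j "" == "1"
    · rw [if_pos hb, Option.some_inj] at hq
      exact ⟨j, hj, hb, hq.symm⟩
    · rw [if_neg hb] at hq; cases hq
  · rintro ⟨j, hj, hb, rfl⟩
    exact ⟨j, hj, by rw [if_pos hb]⟩

lemma mem_rowOnesUpto_iff (grid : List (List String)) (y : Int) (hy : 0 ≤ y) (n : Nat)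
    (q : Int × Int) :
    q ∈ rowOnesUpto y (PySem.List.pyGetD grid y []) n ↔
      isOne grid q = true ∧ q.1 = y ∧ 0 ≤ q.2 ∧ q.2 < (n : Int) := by
  rw [mem_rowOnesUpto]
  constructor
  · rintro ⟨j, hj, hb, rfl⟩
    refine ⟨?_, rfl, Int.natCast_nonneg j, by dsimp only; exact_mod_cast hj⟩
    rw [isOne_row grid y hy]
    exact hb
  · rintro ⟨h1, hq1, hq2, hqn⟩
    refine ⟨q.2.toNat, by omega, ?_, ?_⟩
    · rw [← isOne_row grid y hy, ← hq1, Int.toNat_of_nonneg hq2]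
      simpa using h1
    · rw [Int.toNat_of_nonneg hq2, ← hq1, Prod.mk.eta]

lemma char_append (grid : List (List String)) (acc : List (Int × Int)) (y : Int) (hy : 0 ≤ y)
    (n : Nat) (h : charAt grid acc y 0) :
    charAt grid (acc ++ rowOnesUpto y (PySem.List.pyGetD grid y []) n) y (n : Int) := by
  intro q
  rw [List.mem_append, h q, mem_rowOnesUpto_iff grid y hy n q]
  constructor
  · rintro (⟨h1, h2⟩ | ⟨h1, h2, h3, h4⟩)
    · exact ⟨h1, by omega⟩
    · exact ⟨h1, by omega⟩
  · rintro ⟨h1, h2 | ⟨h2, h3⟩⟩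
    · exact Or.inl ⟨h1, by omega⟩
    · exact Or.inr ⟨h1, h2, (isOne_nonneg h1).2, h3⟩

lemma rowOnesUpto_succ (y : Int) (row : List String) (n : Nat) :
    rowOnesUpto y row (n + 1)
      = rowOnesUpto y row n ++ (if row.getD n "" == "1" then [(y, (n : Int))] else []) := by
  unfold rowOnesUpto
  rw [List.range_succ, List.filterMap_append]
  congr 1
  simp only [List.filterMap_cons, List.filterMap_nil]
  split_ifs <;> rfl

lemma refstep_shift (grid : List (List String)) (l : List (Int × Int)) (c : Int) :
    l.foldl (refstep grid) c = c + l.foldl (refstep grid) 0 := by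
  induction l generalizing c with
  | nil => simp
  | cons p l ih =>
    simp only [List.foldl_cons]
    rw [ih (refstep grid c p), ih (refstep grid 0 p)]
    have : refstep grid c p = c + refstep grid 0 p := by
      unfold refstep; split_ifs <;> omega
    omega

lemma inner_loop (grid : List (List String)) (y : Int) (hy : 0 ≤ y) (n : Nat)
    (acc : List (Int × Int)) (c : Int) (hchar : charAt grid acc y 0) :
    (List.range n).foldl (fun st k => innerStep grid y st ((k : Nat) : Int)) (acc, c)
      = (acc ++ rowOnesUpto y (PySem.List.pyGetD grid y []) n,
         c + (rowOnesUpto y (PySem.List.pyGetD grid y []) n).foldl (refstep grid) 0) := by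
  induction n with
  | zero => simp [rowOnesUpto]
  | succ n ih =>
    rw [List.range_succ, List.foldl_append, ih]
    simp only [List.foldl_cons, List.foldl_nil]
    have hchn : charAt grid (acc ++ rowOnesUpto y (PySem.List.pyGetD grid y []) n) y (n : Int) :=
      char_append grid acc y hy n hchar
    have hnotmem : (y, ((n : Nat) : Int)) ∉ acc ++ rowOnesUpto y (PySem.List.pyGetD grid y []) n := by
      rw [hchn (y, ((n : Nat) : Int))]
      rintro ⟨-, h | ⟨-, h⟩⟩ <;> dsimp only at h <;> omega
    rw [innerStep_eval]
    by_cases hb : (PySem.List.pyGetD grid y []).getD n "" == "1"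
    · -- grid[y][n] == "1": the cell is appended
      rw [if_pos ⟨hnotmem, by rw [PySem.List.pyGetD_natCast]; exact hb⟩]
      have heq : (acc ++ rowOnesUpto y (PySem.List.pyGetD grid y []) n) ++ [(y, ((n : Nat) : Int))]
          = acc ++ rowOnesUpto y (PySem.List.pyGetD grid y []) (n + 1) := by
        rw [rowOnesUpto_succ, if_pos hb, List.append_assoc]
      have hch1 : charAt grid (acc ++ rowOnesUpto y (PySem.List.pyGetD grid y []) (n + 1)) y
          (((n + 1 : Nat)) : Int) := char_append grid acc y hy (n + 1) hchar
      have hm1 : ((y - 1, ((n : Nat) : Int)) ∈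
            (acc ++ rowOnesUpto y (PySem.List.pyGetD grid y []) n) ++ [(y, ((n : Nat) : Int))]) ↔
          isOne grid (y - 1, ((n : Nat) : Int)) = true := by
        rw [heq, hch1]
        exact ⟨fun h => h.1, fun h => ⟨h, Or.inl (by dsimp only; omega)⟩⟩
      have hm3 : ((y, ((n : Nat) : Int) - 1) ∈
            (acc ++ rowOnesUpto y (PySem.List.pyGetD grid y []) n) ++ [(y, ((n : Nat) : Int))]) ↔
          isOne grid (y, ((n : Nat) : Int) - 1) = true := by
        rw [heq, hch1]
        exact ⟨fun h => h.1, fun h => ⟨h, Or.inr ⟨rfl, by dsimp only; push_cast; omega⟩⟩⟩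
      have hm2 : (y + 1, ((n : Nat) : Int)) ∉
          (acc ++ rowOnesUpto y (PySem.List.pyGetD grid y []) n) ++ [(y, ((n : Nat) : Int))] := by
        rw [heq, hch1]
        rintro ⟨-, h | ⟨h, -⟩⟩ <;> dsimp only at h <;> omega
      have hm4 : (y, ((n : Nat) : Int) + 1) ∉
          (acc ++ rowOnesUpto y (PySem.List.pyGetD grid y []) n) ++ [(y, ((n : Nat) : Int))] := by
        rw [heq, hch1]
        rintro ⟨-, h | ⟨-, h⟩⟩ <;> dsimp only at h
        · omega
        · push_cast at h; omega
      rw [rowOnesUpto_succ, if_pos hb, List.foldl_append]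
      simp only [List.foldl_cons, List.foldl_nil]
      rw [refstep_shift grid (rowOnesUpto y (PySem.List.pyGetD grid y []) n) _]
      unfold refstep
      by_cases hg : ¬ isOne grid (y - 1, ((n : Nat) : Int)) = true ∧
          ¬ isOne grid (y, ((n : Nat) : Int) - 1) = true
      · rw [if_pos ⟨fun hmem => hg.1 (hm1.mp hmem), hm2, fun hmem => hg.2 (hm3.mp hmem), hm4⟩]
        rw [if_pos hg, List.append_assoc]
        simp only [Prod.mk.injEq, true_and]
        omega
      · have hng : ¬ ((y - 1, ((n : Nat) : Int)) ∉
              (acc ++ rowOnesUpto y (PySem.List.pyGetD grid y []) n) ++ [(y, ((n : Nat) : Int))] ∧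
            (y + 1, ((n : Nat) : Int)) ∉
              (acc ++ rowOnesUpto y (PySem.List.pyGetD grid y []) n) ++ [(y, ((n : Nat) : Int))] ∧
            (y, ((n : Nat) : Int) - 1) ∉
              (acc ++ rowOnesUpto y (PySem.List.pyGetD grid y []) n) ++ [(y, ((n : Nat) : Int))] ∧
            (y, ((n : Nat) : Int) + 1) ∉
              (acc ++ rowOnesUpto y (PySem.List.pyGetD grid y []) n) ++ [(y, ((n : Nat) : Int))]) := by
          rintro ⟨g1, -, g3, -⟩
          rcases not_and_or.mp hg with h | h
          · exact g1 (hm1.mpr (not_not.mp h))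
          · exact g3 (hm3.mpr (not_not.mp h))
        rw [if_neg hng, if_neg hg, List.append_assoc]
    · -- grid[y][n] != "1": nothing happens
      rw [rowOnesUpto_succ, if_neg hb]
      rw [if_neg (by rintro ⟨-, h⟩; rw [PySem.List.pyGetD_natCast] at h; exact hb h)]
      simp

lemma mem_onesUpto (grid : List (List String)) (k : Nat) (q : Int × Int) :
    q ∈ onesUpto grid k ↔ isOne grid q = true ∧ q.1 < (k : Int) := by
  simp only [onesUpto, List.mem_flatMap, List.mem_range]
  constructor
  · rintro ⟨i, hi, hq⟩
    rw [show (grid.getD i [] : List String) = PySem.List.pyGetD grid (i : Int) [] by simp] at hq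
    rw [mem_rowOnesUpto_iff grid (i : Int) (Int.natCast_nonneg i)] at hq
    obtain ⟨h1, h2, h3, h4⟩ := hq
    exact ⟨h1, by omega⟩
  · rintro ⟨h1, h2⟩
    have h0 := isOne_nonneg h1
    have h1' : isOne grid (q.1, q.2) = true := by simpa using h1
    refine ⟨q.1.toNat, by omega, ?_⟩
    rw [show (grid.getD q.1.toNat [] : List String) = PySem.List.pyGetD grid (q.1.toNat : Int) []
      by rw [PySem.List.pyGetD_natCast]]
    rw [mem_rowOnesUpto_iff grid _ (Int.natCast_nonneg _), Int.toNat_of_nonneg h0.1]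
    exact ⟨h1, rfl, h0.2, isOne_col_lt h1'⟩

lemma charAt_onesUpto (grid : List (List String)) (k : Nat) :
    charAt grid (onesUpto grid k) (k : Int) 0 := by
  intro q
  rw [mem_onesUpto]
  constructor
  · rintro ⟨h1, h2⟩
    exact ⟨h1, Or.inl h2⟩
  · rintro ⟨h1, h2 | ⟨-, h3⟩⟩
    · exact ⟨h1, h2⟩
    · have := (isOne_nonneg h1).2
      omega

lemma onesUpto_succ (grid : List (List String)) (k : Nat) :
    onesUpto grid (k + 1)
      = onesUpto grid k ++ rowOnesUpto (k : Int) (grid.getD k []) (grid.getD k []).length := by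
  unfold onesUpto
  rw [List.range_succ, List.flatMap_append]
  simp

lemma outer_loop (grid : List (List String)) (k : Nat) :
    (List.range k).foldl
      (fun st (i : Nat) =>
        (PySem.List.pyRange 0 ((PySem.List.pyGetD grid (i : Int) []).length : Int) 1).foldl
          (innerStep grid (i : Int)) st)
      (([] : List (Int × Int)), (0 : Int))
      = (onesUpto grid k, (onesUpto grid k).foldl (refstep grid) 0) := by
  induction k with
  | zero => simp [onesUpto]
  | succ k ih =>
    rw [List.range_succ, List.foldl_append, ih]
    simp only [List.foldl_cons, List.foldl_nil]
    rw [foldl_pyRange_natCast]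
    rw [inner_loop grid (k : Int) (Int.natCast_nonneg k) _ _ _ (charAt_onesUpto grid k)]
    rw [onesUpto_succ]
    rw [show (grid.getD k [] : List String) = PySem.List.pyGetD grid (k : Int) []
      by rw [PySem.List.pyGetD_natCast]]
    rw [List.foldl_append]
    rw [refstep_shift grid
      (rowOnesUpto (k : Int) (PySem.List.pyGetD grid (k : Int) [])
        (PySem.List.pyGetD grid (k : Int) []).length)
      (List.foldl (refstep grid) 0 (onesUpto grid k))]

-- per-row form of B's comprehension
lemma filterMap_enumerate_row (y : Int) (row : List String) :
    (PySem.List.enumerate row 0).filterMap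
        (fun xc => if xc.2 == "1" then some (y, xc.1) else none)
      = rowOnesUpto y row row.length := by
  rw [PySem.List.enumerate_eq_map_pyRange (d := ""), PySem.List.pyRange_one]
  simp only [sub_zero, PySem.List.len_eq, Int.toNat_natCast]
  rw [List.filterMap_map, List.filterMap_map]
  unfold rowOnesUpto
  congr 1
  funext j
  simp [PySem.List.pyGetD_natCast]

-- B's comprehension computes exactly the '1' cells, row-major
lemma islands_alt_eq (grid : List (List String)) :
    (PySem.List.enumerate grid 0).flatMap
        (fun yr => (PySem.List.enumerate yr.2 0).filterMap
          (fun xc => if xc.2 == "1" then some (yr.1, xc.1) else none))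
      = onesUpto grid grid.length := by
  rw [PySem.List.enumerate_eq_map_pyRange (d := ([] : List String)), PySem.List.pyRange_one]
  simp only [sub_zero, PySem.List.len_eq, Int.toNat_natCast]
  rw [List.flatMap_map, List.flatMap_map]
  unfold onesUpto
  congr 1
  funext i
  show (PySem.List.enumerate (PySem.List.pyGetD grid (0 + (i : Int)) []) 0).filterMap
      (fun xc => if xc.2 == "1" then some (0 + (i : Int), xc.1) else none)
    = rowOnesUpto (i : Int) (grid.getD i []) (grid.getD i []).length
  rw [filterMap_enumerate_row]
  simp

lemma contains_ofList_ones (grid : List (List String)) (q : Int × Int) :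
    PySem.Set.contains (PySem.Set.ofList (onesUpto grid grid.length)) q = isOne grid q := by
  by_cases h : isOne grid q = true
  · rw [h]
    have h' : isOne grid (q.1, q.2) = true := by simpa using h
    exact (PySem.Set.contains_iff _ _).mpr ((PySem.Set.mem_ofList _ _).mpr
      ((mem_onesUpto grid grid.length q).mpr ⟨h, isOne_row_lt h'⟩))
  · have hf : isOne grid q = false := by simpa using h
    rw [hf]
    cases hc : PySem.Set.contains (PySem.Set.ofList (onesUpto grid grid.length)) q
    · rfl
    · exact absurd ((mem_onesUpto grid grid.length q).mp
        ((PySem.Set.mem_ofList _ _).mp ((PySem.Set.contains_iff _ _).mp hc))).1 h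

theorem landBF_eq_ref (grid : List (List String)) :
    landBF grid = (onesUpto grid grid.length,
      (onesUpto grid grid.length).foldl (refstep grid) 0) := by
  have h0 : landBF grid
      = (PySem.List.pyRange 0 (grid.length : Int) 1).foldl
          (fun st y =>
            (PySem.List.pyRange 0 ((PySem.List.pyGetD grid y []).length : Int) 1).foldl
              (innerStep grid y) st)
          (([] : List (Int × Int)), (0 : Int)) := rfl
  rw [h0, foldl_pyRange_natCast]
  exact outer_loop grid grid.length

theorem landBF_alt_eq_ref (grid : List (List String)) :
    landBF_alt grid = (onesUpto grid grid.length,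
      (onesUpto grid grid.length).foldl (refstep grid) 0) := by
  simp only [landBF_alt]
  rw [islands_alt_eq]
  simp only [contains_ofList_ones]
  rfl

-- ===== VERDICT (by name: the statement is the Claim_ definition above) =====
theorem landBF_spec : Claim_equal_landBF := by
  intro grid _
  unfold Spec_landBF
  rw [landBF_eq_ref, landBF_alt_eq_ref]
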